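-- pv_equiv track=rewrite | github.com/DarkmatterVale/regex4dummies | regex4dummies/semantic_parsers/nlpnet_parser.py | identify_sentence_parts_nlpnet
-- ===== SOURCE A (Python) =====
-- def identify_sentence_parts_nlpnet( tokens, labels ):
--     subject               = ""
--     verb                  = ""
--     object                = ""
--     prepositional_phrases = ""
--
--     for index in range( 0, len( labels ) ):
--         if "SBJ" in labels[ index ] and verb == "":
--             subject += tokens[ index ] + " "
--         elif "ROOT" in labels[ index ]:
--             verb += tokens[ index ]
--         elif "PRD" in labels[ index ] or "OBJ" in labels[ index ]:
--             object += tokens[ index ] + " "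
--         elif "LOC" in labels[ index ]:
--             for prep_index in range( index, len( labels ) ):
--                 if "PMOD" in labels[ prep_index ] and ' '.join( tokens[ index : prep_index + 1 ] ) not in prepositional_phrases:
--                     prepositional_phrases += ' '.join( tokens[ index : prep_index + 1 ] ) + "..."
--
--                     break
--
--
--     return subject, verb, object, prepositional_phrases.split( "..." )
-- ===== SOURCE B (Python) =====
-- def identify_sentence_parts_nlpnet(tokens, labels):
--     # Precompute the sorted list of PMOD positions once; each LOC then walks a
--     # monotone pointer into that list rather than scanning the label list itself.
--     pmods = [j for j, lab in enumerate(labels) if "PMOD" in lab]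
--     subject_parts = []
--     verb = ""
--     object_parts = []
--     preps = ""
--     pos = 0
--     for i, lab in enumerate(labels):
--         if "SBJ" in lab and verb == "":
--             subject_parts.append(tokens[i])
--         elif "ROOT" in lab:
--             verb += tokens[i]
--         elif "PRD" in lab or "OBJ" in lab:
--             object_parts.append(tokens[i])
--         elif "LOC" in lab:
--             while pos < len(pmods) and pmods[pos] < i:
--                 pos += 1
--             for j in pmods[pos:]:
--                 phrase = ' '.join(tokens[i:j + 1])
--                 if phrase not in preps:
--                     preps += phrase + "..."
--                     break
--     subject = ''.join(t + ' ' for t in subject_parts)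
--     object_ = ''.join(t + ' ' for t in object_parts)
--     return subject, verb, object_, preps.split("...")
-- ===== Notes on version B (the rewrite author's own statement) =====
-- stated objective: alternative
-- what changed: B precomputes the list of PMOD positions once and each LOC label walks that list from a monotone pointer instead of rescanning every following label; subject/object are accumulated as lists joined at the end.
import Mathlib
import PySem

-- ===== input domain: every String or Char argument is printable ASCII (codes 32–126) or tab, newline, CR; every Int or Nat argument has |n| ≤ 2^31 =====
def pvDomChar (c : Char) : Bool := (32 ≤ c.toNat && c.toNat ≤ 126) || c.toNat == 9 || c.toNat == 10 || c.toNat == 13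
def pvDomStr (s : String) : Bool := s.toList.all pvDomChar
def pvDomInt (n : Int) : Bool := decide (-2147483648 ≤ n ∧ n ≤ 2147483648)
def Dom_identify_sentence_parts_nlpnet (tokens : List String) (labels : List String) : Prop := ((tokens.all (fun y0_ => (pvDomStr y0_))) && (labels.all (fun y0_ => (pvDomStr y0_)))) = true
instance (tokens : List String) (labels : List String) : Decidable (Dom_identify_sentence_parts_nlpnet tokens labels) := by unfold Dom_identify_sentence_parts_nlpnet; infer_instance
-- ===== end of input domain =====

-- B replaces A's inner rescan of all following labels by a precomputed list of PMOD
-- positions walked with a monotone pointer, and accumulates subject/object as lists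
-- joined at the end (objective: alternative algorithm, same measured cost).

-- ' '.join(tokens[i:j+1]) — the phrase expression both sources contain verbatim
def pvPhrase (tokens : List String) (i j : Nat) : String :=
  PySem.Str.join " " (PySem.List.slice tokens (some (i : Int)) (some ((j : Int) + 1)))

-- ===== PORT A =====
-- inner 'for prep_index in range(index, len(labels)): …' loop of A
def pvAInner (tokens labels : List String) (i : Nat) (preps : String) : List Nat → String
  | [] => preps
  | j :: rest =>
    if PySem.Str.isIn "PMOD" (labels.getD j "") && !(PySem.Str.isIn (pvPhrase tokens i j) preps) then
      preps ++ pvPhrase tokens i j ++ "..."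
    else pvAInner tokens labels i preps rest

-- outer 'for index in range(0, len(labels)):' loop; tokens[index] is getD (in range under Pre_)
def pvALoop (tokens labels : List String) (idxs : List Nat)
    (st : String × String × String × String) : String × String × String × String :=
  match idxs with
  | [] => st
  | i :: rest =>
    let (subj, verb, obj, preps) := st
    let lab := labels.getD i ""
    if PySem.Str.isIn "SBJ" lab && (verb == "") then
      pvALoop tokens labels rest (subj ++ tokens.getD i "" ++ " ", verb, obj, preps)
    else if PySem.Str.isIn "ROOT" lab then
      pvALoop tokens labels rest (subj, verb ++ tokens.getD i "", obj, preps)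
    else if PySem.Str.isIn "PRD" lab || PySem.Str.isIn "OBJ" lab then
      pvALoop tokens labels rest (subj, verb, obj ++ tokens.getD i "" ++ " ", preps)
    else if PySem.Str.isIn "LOC" lab then
      pvALoop tokens labels rest
        (subj, verb, obj, pvAInner tokens labels i preps (List.range' i (labels.length - i)))
    else pvALoop tokens labels rest (subj, verb, obj, preps)

def identify_sentence_parts_nlpnet (tokens : List String) (labels : List String) :
    String × String × String × List String :=
  let st := pvALoop tokens labels (List.range labels.length) ("", "", "", "")
  -- prepositional_phrases.split("..."): sep ≠ "" so split? is never none
  (st.1, st.2.1, st.2.2.1, (PySem.Str.split? st.2.2.2 "...").getD [])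

-- ===== PORT B =====
-- [j for j, lab in enumerate(labels) if "PMOD" in lab]
def pvPmods (labels : List String) (i : Nat) : List Nat :=
  match labels with
  | [] => []
  | lab :: rest =>
    if PySem.Str.isIn "PMOD" lab then i :: pvPmods rest (i + 1) else pvPmods rest (i + 1)

-- 'for j in pmods[pos:]: …' — iterates only PMOD positions
def pvBInner (tokens : List String) (i : Nat) (preps : String) : List Nat → String
  | [] => preps
  | j :: rest =>
    if !(PySem.Str.isIn (pvPhrase tokens i j) preps) then preps ++ pvPhrase tokens i j ++ "..."
    else pvBInner tokens i preps rest

-- 'for i, lab in enumerate(labels):' with the monotone pointer pos carried as the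
-- remaining suffix pmods[pos:] of the pmods list; the while loop is its dropWhile
def pvBLoop (tokens : List String) (i : Nat) (labs : List String)
    (st : List String × String × List String × String × List Nat) :
    List String × String × List String × String × List Nat :=
  match labs with
  | [] => st
  | lab :: more =>
    let (sp, verb, op, preps, rest) := st
    if PySem.Str.isIn "SBJ" lab && (verb == "") then
      pvBLoop tokens (i + 1) more (sp ++ [tokens.getD i ""], verb, op, preps, rest)
    else if PySem.Str.isIn "ROOT" lab then
      pvBLoop tokens (i + 1) more (sp, verb ++ tokens.getD i "", op, preps, rest)
    else if PySem.Str.isIn "PRD" lab || PySem.Str.isIn "OBJ" lab then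
      pvBLoop tokens (i + 1) more (sp, verb, op ++ [tokens.getD i ""], preps, rest)
    else if PySem.Str.isIn "LOC" lab then
      let rest' := rest.dropWhile (fun j => decide (j < i))
      pvBLoop tokens (i + 1) more (sp, verb, op, pvBInner tokens i preps rest', rest')
    else pvBLoop tokens (i + 1) more (sp, verb, op, preps, rest)

def identify_sentence_parts_nlpnet_alt (tokens : List String) (labels : List String) :
    String × String × String × List String :=
  let st := pvBLoop tokens 0 labels ([], "", [], "", pvPmods labels 0)
  (PySem.Str.join "" (st.1.map (· ++ " ")), st.2.1,
   PySem.Str.join "" (st.2.2.1.map (· ++ " ")),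
   (PySem.Str.split? st.2.2.2.1 "...").getD [])

-- ===== PRECONDITION & SPEC =====
-- Pre_ excludes EXACTLY the inputs on which A (and likewise B) raises IndexError reading
-- tokens[i]: a label index i with no token whose SBJ/ROOT/PRD/OBJ branch fires; the SBJ
-- branch fires only while verb is still empty, i.e. before any index j carrying a
-- ROOT-but-not-SBJ label with a nonempty token (that ∃ is the closed-form of verb ≠ "").
def Pre_identify_sentence_parts_nlpnet (tokens : List String) (labels : List String) : Prop :=
  ((List.range labels.length).all (fun i =>
    decide (i < tokens.length) ||
    (!(PySem.Str.isIn "ROOT" (labels.getD i "")) &&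
     !(PySem.Str.isIn "PRD" (labels.getD i "")) &&
     !(PySem.Str.isIn "OBJ" (labels.getD i "")) &&
     (!(PySem.Str.isIn "SBJ" (labels.getD i "")) ||
      (List.range i).any (fun j =>
        PySem.Str.isIn "ROOT" (labels.getD j "") &&
        !(PySem.Str.isIn "SBJ" (labels.getD j "")) &&
        !(tokens.getD j "" == "")))))) = true
instance (tokens : List String) (labels : List String) :
    Decidable (Pre_identify_sentence_parts_nlpnet tokens labels) := by
  unfold Pre_identify_sentence_parts_nlpnet; infer_instance

def pvWitness_identify_sentence_parts_nlpnet : List String × List String :=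
  (["John", "runs", "home"], ["SBJ", "ROOT", "OBJ"])

def Spec_identify_sentence_parts_nlpnet (tokens : List String) (labels : List String) (out : String × String × String × List String) : Prop := out = identify_sentence_parts_nlpnet_alt tokens labels
instance (tokens : List String) (labels : List String) (out : String × String × String × List String) : Decidable (Spec_identify_sentence_parts_nlpnet tokens labels out) := by unfold Spec_identify_sentence_parts_nlpnet; infer_instance

-- ===== CLAIM (what is proved, stated in full; the proofs are below) =====
def Claim_equal_identify_sentence_parts_nlpnet : Prop := ∀ (tokens : List String) (labels : List String), Dom_identify_sentence_parts_nlpnet tokens labels → Pre_identify_sentence_parts_nlpnet tokens labels → Spec_identify_sentence_parts_nlpnet tokens labels (identify_sentence_parts_nlpnet tokens labels)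

-- ===== LEMMAS AND PROOFS =====

-- ''.join over a snoc: Str.join "" (l ++ [s]) = Str.join "" l ++ s
theorem pv_join_snoc (l : List String) (s : String) :
    PySem.Str.join "" (l ++ [s]) = PySem.Str.join "" l ++ s := by
  apply String.toList_inj.mp
  have key : ∀ (xs : List (List Char)) (y : List Char),
      PySem.Chars.join [] (xs ++ [y]) = PySem.Chars.join [] xs ++ y := by
    intro xs y
    induction xs with
    | nil => simp
    | cons a as ih =>
      cases as with
      | nil => simp [PySem.Chars.join_cons_cons]
      | cons b bs => simp [PySem.Chars.join_cons_cons] at *; simp [ih]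
  simp [PySem.Str.toList_join, key]

-- A's inner scan over arbitrary index list = B's scan over its PMOD-filtered sublist
theorem pv_inner_eq (tokens labels : List String) (i : Nat) :
    ∀ (l : List Nat) (preps : String),
      pvAInner tokens labels i preps l =
        pvBInner tokens i preps (l.filter (fun j => PySem.Str.isIn "PMOD" (labels.getD j ""))) := by
  intro l
  induction l with
  | nil => intro preps; rfl
  | cons j rest ih =>
    intro preps
    by_cases hp : PySem.Str.isIn "PMOD" (labels.getD j "") = true
    · by_cases hin : PySem.Str.isIn (pvPhrase tokens i j) preps = true
      · simp only [pvAInner, pvBInner, List.filter_cons, hp, hin, Bool.not_true,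
          Bool.and_false, Bool.false_eq_true, if_false, if_true]
        exact ih preps
      · simp only [pvAInner, pvBInner, List.filter_cons, hp,
          eq_false_of_ne_true hin, Bool.not_false, Bool.and_true, if_true]
    · simp only [pvAInner, List.filter_cons, eq_false_of_ne_true hp, Bool.false_and,
        Bool.false_eq_true]
      exact ih preps

theorem pv_pmods_eq (labs : List String) :
    ∀ (k : Nat), pvPmods labs k =
      (List.range' k labs.length).filter (fun j => PySem.Str.isIn "PMOD" (labs.getD (j - k) "")) := by
  induction labs with
  | nil => intro k; rfl
  | cons lab rest ih =>
    intro k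
    have hrange : List.range' k (lab :: rest).length = k :: List.range' (k+1) rest.length := by
      simp [List.range'_succ]
    rw [hrange, List.filter_cons]
    have hcong : (List.range' (k+1) rest.length).filter
          (fun j => PySem.Str.isIn "PMOD" ((lab :: rest).getD (j - k) "")) =
        (List.range' (k+1) rest.length).filter
          (fun j => PySem.Str.isIn "PMOD" (rest.getD (j - (k+1)) "")) := by
      apply List.filter_congr
      intro j hj
      have hk : k + 1 ≤ j := (List.mem_range'_1.mp hj).1
      have h1 : j - k = (j - (k+1)) + 1 := by omega
      simp [h1]
    simp only [Nat.sub_self, List.getD_cons_zero]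
    rw [hcong]
    by_cases hp : PySem.Str.isIn "PMOD" lab = true
    · simp only [pvPmods]
      rw [if_pos hp, if_pos hp, ih (k+1)]
    · simp only [pvPmods]
      rw [if_neg hp, if_neg hp, ih (k+1)]

theorem pv_dropWhile_all {α : Type} (p : α → Bool) (l1 l2 : List α) (h : ∀ x ∈ l1, p x = true) :
    List.dropWhile p (l1 ++ l2) = List.dropWhile p l2 := by
  induction l1 with
  | nil => rfl
  | cons x xs ih =>
    simp only [List.cons_append, List.dropWhile_cons, h x (by simp)]
    exact ih (fun y hy => h y (by simp [hy]))

-- the pointer suffix, advanced to i, is exactly A's scan range filtered to PMODs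
theorem pv_rest_eq (labels : List String) (pre rest : List Nat) (i : Nat)
    (hsplit : pvPmods labels 0 = pre ++ rest) (hpre : ∀ x ∈ pre, x < i) :
    rest.dropWhile (fun j => decide (j < i)) =
      (List.range' i (labels.length - i)).filter
        (fun j => PySem.Str.isIn "PMOD" (labels.getD j "")) := by
  have hpm := pv_pmods_eq labels 0
  simp only [Nat.sub_zero] at hpm
  set P : Nat → Bool := fun j => PySem.Str.isIn "PMOD" (labels.getD j "") with hP
  set p : Nat → Bool := fun j => decide (j < i) with hp
  have h1 : List.dropWhile p (pre ++ rest) = List.dropWhile p rest :=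
    pv_dropWhile_all p pre rest (fun x hx => by simp [hp, hpre x hx])
  by_cases hi : i ≤ labels.length
  · have hsplitrange : List.range' 0 labels.length =
        List.range' 0 i ++ List.range' i (labels.length - i) := by
      have := @List.range'_append 0 i (labels.length - i) 1
      simp only [one_mul, Nat.zero_add] at this
      rw [this]; congr 1; omega
    have h2 : List.dropWhile p ((List.range' 0 i).filter P ++
          (List.range' i (labels.length - i)).filter P)
        = List.dropWhile p ((List.range' i (labels.length - i)).filter P) := by
      apply pv_dropWhile_all
      intro x hx
      have := (List.mem_range'_1.mp (List.mem_of_mem_filter hx)).2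
      simp [hp]; omega
    have h3 : List.dropWhile p ((List.range' i (labels.length - i)).filter P)
        = (List.range' i (labels.length - i)).filter P := by
      cases hF : (List.range' i (labels.length - i)).filter P with
      | nil => rfl
      | cons x xs =>
        have hx : x ∈ (List.range' i (labels.length - i)).filter P := by rw [hF]; simp
        have := (List.mem_range'_1.mp (List.mem_of_mem_filter hx)).1
        simp [List.dropWhile_cons, hp]
        omega
    calc rest.dropWhile p = List.dropWhile p (pre ++ rest) := h1.symm
      _ = List.dropWhile p (pvPmods labels 0) := by rw [hsplit]
      _ = _ := by rw [hpm, hsplitrange, List.filter_append, h2, h3]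
  · have hz : labels.length - i = 0 := by omega
    rw [hz]
    have hmem : ∀ x ∈ pre ++ rest, x < labels.length := by
      intro x hx
      rw [← hsplit, hpm] at hx
      have := (List.mem_range'_1.mp (List.mem_of_mem_filter hx)).2
      omega
    have hrest : List.dropWhile p rest = [] := by
      rw [List.dropWhile_eq_nil_iff]
      intro x hx
      have := hmem x (by simp [hx])
      simp [hp]; omega
    simp [hrest]

theorem pv_loop_eq (tokens labels : List String) :
    ∀ (suf : List String) (i : Nat) (verb preps : String) (sp op : List String)
      (pre rest : List Nat),
      labels.drop i = suf →
      pvPmods labels 0 = pre ++ rest → (∀ x ∈ pre, x < i) →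
      pvALoop tokens labels (List.range' i suf.length)
          (PySem.Str.join "" (sp.map (· ++ " ")), verb, PySem.Str.join "" (op.map (· ++ " ")), preps) =
        (fun st => (PySem.Str.join "" (st.1.map (· ++ " ")), st.2.1,
                    PySem.Str.join "" (st.2.2.1.map (· ++ " ")), st.2.2.2.1))
          (pvBLoop tokens i suf (sp, verb, op, preps, rest)) := by
  intro suf
  induction suf with
  | nil => intro i verb preps sp op pre rest hdrop hsplit hpre; rfl
  | cons lab suf' ih =>
    intro i verb preps sp op pre rest hdrop hsplit hpre
    have hlab : labels.getD i "" = lab := by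
      have : labels[i]? = some lab := by
        rw [← List.head?_drop, hdrop]; rfl
      simp [List.getD, this]
    have hdrop' : labels.drop (i + 1) = suf' := by
      have : labels.drop (i+1) = (labels.drop i).drop 1 := by rw [List.drop_drop]
      rw [this, hdrop]; rfl
    have hsnocS : ∀ t : String,
        PySem.Str.join "" (sp.map (· ++ " ")) ++ t ++ " " =
          PySem.Str.join "" ((sp ++ [t]).map (· ++ " ")) := by
      intro t
      rw [List.map_append, List.map_singleton, pv_join_snoc, String.append_assoc]
    have hsnocO : ∀ t : String,
        PySem.Str.join "" (op.map (· ++ " ")) ++ t ++ " " =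
          PySem.Str.join "" ((op ++ [t]).map (· ++ " ")) := by
      intro t
      rw [List.map_append, List.map_singleton, pv_join_snoc, String.append_assoc]
    have hpre' : ∀ x ∈ pre, x < i + 1 := fun x hx => Nat.lt_succ_of_lt (hpre x hx)
    simp only [List.length_cons, List.range'_succ, pvALoop, pvBLoop, hlab]
    by_cases h1 : (PySem.Str.isIn "SBJ" lab && (verb == "")) = true
    · simp only [h1, ite_true]
      rw [hsnocS (tokens.getD i "")]
      exact ih (i+1) verb preps (sp ++ [tokens.getD i ""]) op pre rest hdrop' hsplit hpre'
    · simp only [eq_false_of_ne_true h1, Bool.false_eq_true, ite_false]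
      by_cases h2 : PySem.Str.isIn "ROOT" lab = true
      · simp only [h2, ite_true]
        exact ih (i+1) (verb ++ tokens.getD i "") preps sp op pre rest hdrop' hsplit hpre'
      · simp only [eq_false_of_ne_true h2, Bool.false_eq_true, ite_false]
        by_cases h3 : (PySem.Str.isIn "PRD" lab || PySem.Str.isIn "OBJ" lab) = true
        · simp only [h3, ite_true]
          rw [hsnocO (tokens.getD i "")]
          exact ih (i+1) verb preps sp (op ++ [tokens.getD i ""]) pre rest hdrop' hsplit hpre'
        · simp only [eq_false_of_ne_true h3, Bool.false_eq_true, ite_false]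
          by_cases h4 : PySem.Str.isIn "LOC" lab = true
          · simp only [h4, ite_true]
            have hrest' : rest.dropWhile (fun j => decide (j < i)) =
                (List.range' i (labels.length - i)).filter
                  (fun j => PySem.Str.isIn "PMOD" (labels.getD j "")) :=
              pv_rest_eq labels pre rest i hsplit hpre
            have hpreps : pvAInner tokens labels i preps (List.range' i (labels.length - i)) =
                pvBInner tokens i preps (rest.dropWhile (fun j => decide (j < i))) := by
              rw [hrest', pv_inner_eq]
            rw [hpreps]
            have hsplit2 : pvPmods labels 0 =
                (pvPmods labels 0).takeWhile (fun j => decide (j < i)) ++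
                  rest.dropWhile (fun j => decide (j < i)) := by
              conv_lhs => rw [← List.takeWhile_append_dropWhile
                (p := fun j => decide (j < i)) (l := pvPmods labels 0)]
              congr 1
              rw [hsplit]
              exact pv_dropWhile_all _ pre rest (fun x hx => by simp [hpre x hx])
            exact ih (i+1) verb (pvBInner tokens i preps (rest.dropWhile (fun j => decide (j < i))))
              sp op _ _ hdrop' hsplit2
              (fun x hx => by
                have := List.mem_takeWhile_imp hx
                simp at this; omega)
          · simp only [eq_false_of_ne_true h4, Bool.false_eq_true, ite_false]
            exact ih (i+1) verb preps sp op pre rest hdrop' hsplit hpre'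

-- ===== VERDICT (by name: the statement is the Claim_ definition above) =====
theorem identify_sentence_parts_nlpnet_spec : Claim_equal_identify_sentence_parts_nlpnet := by
  intro tokens labels _ _
  unfold Spec_identify_sentence_parts_nlpnet identify_sentence_parts_nlpnet
    identify_sentence_parts_nlpnet_alt
  have h := pv_loop_eq tokens labels labels 0 "" "" [] [] [] (pvPmods labels 0)
    (by simp) (by simp) (by simp)
  simp only [List.map_nil] at h
  have hj : PySem.Str.join "" ([] : List String) = "" := rfl
  rw [hj] at h
  rw [List.range_eq_range']
  rw [h]
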